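-- pv_equiv track=rewrite | github.com/allocate-planner/allocate | backend/api/audio/use_cases/process_audio_use_case.py | _group_events_by_date
-- ===== SOURCE A (Python) =====
-- def _group_events_by_date(events: list[dict | None]) -> dict[str, list[dict]]:
--     events_by_date: dict[str, list[dict]] = {}
--
--     for event in events:
--         if not event:
--             continue
--
--         event_date = event.get("date")
--         if not event_date:
--             continue
--
--         if event_date not in events_by_date:
--             events_by_date[event_date] = []
--
--         events_by_date[event_date].append(
--             {
--                 "id": event.get("id"),
--                 "title": event.get("title", ""),
--                 "description": event.get("description", ""),
--                 "start_time": event.get("start_time", ""),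
--                 "end_time": event.get("end_time", ""),
--             }
--         )
--
--     return events_by_date
-- ===== SOURCE B (Python) =====
-- def _group_events_by_date(events):
--     def _project(event):
--         return {
--             "id": event.get("id"),
--             "title": event.get("title", ""),
--             "description": event.get("description", ""),
--             "start_time": event.get("start_time", ""),
--             "end_time": event.get("end_time", ""),
--         }
--
--     dated = [event for event in events if event and event.get("date")]
--     dates = list(dict.fromkeys(event["date"] for event in dated))
--     return {
--         date: [_project(event) for event in dated if event["date"] == date]
--         for date in dates
--     }
-- ===== Notes on version B (the rewrite author's own statement) =====
-- stated objective: alternative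
-- what changed: A's one-pass hash bucketing (setdefault-then-append into a dict) is replaced by a filter pass, an ordered dedup of the dates, and a dict comprehension doing one filtered scan per distinct date.
import Mathlib
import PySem

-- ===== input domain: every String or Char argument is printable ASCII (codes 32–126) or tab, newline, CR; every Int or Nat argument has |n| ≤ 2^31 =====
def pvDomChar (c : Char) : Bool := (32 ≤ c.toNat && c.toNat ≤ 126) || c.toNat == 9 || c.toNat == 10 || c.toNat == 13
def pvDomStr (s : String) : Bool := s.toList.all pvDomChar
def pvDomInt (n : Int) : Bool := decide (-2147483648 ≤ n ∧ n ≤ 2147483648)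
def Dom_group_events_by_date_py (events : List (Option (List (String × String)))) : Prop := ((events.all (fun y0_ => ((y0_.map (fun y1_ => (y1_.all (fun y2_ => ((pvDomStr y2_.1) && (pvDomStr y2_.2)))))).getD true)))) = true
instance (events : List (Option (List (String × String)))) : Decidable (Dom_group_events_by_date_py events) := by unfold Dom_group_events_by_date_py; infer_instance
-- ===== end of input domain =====

-- B replaces A's one-pass dict bucketing by filter + ordered date dedup + one filtered scan per date (alternative decomposition, same results).

-- ===== PORT A =====
-- shared projection helper: the {id,title,description,start_time,end_time} dict both Pythons build.
-- For "id" Python has event.get("id") (None when absent); Pre_ keeps the key present, where this is exact.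
def pvProj (ev : List (String × String)) : List (String × String) :=
  let d := PySem.Dict.ofList ev
  [("id", (d.get? "id").getD ""),
   ("title", d.getD "title" ""),
   ("description", d.getD "description" ""),
   ("start_time", d.getD "start_time" ""),
   ("end_time", d.getD "end_time" "")]

def group_events_by_date_py (events : List (Option (List (String × String)))) : List (String × List (List (String × String))) :=
  (events.foldl (fun acc event =>
    match event with
    | none => acc                    -- `if not event: continue` (None)
    | some ev =>
      if ev = [] then acc            -- `if not event: continue` (empty dict)
      else
        match (PySem.Dict.ofList ev).get? "date" with
        | none => acc                -- `if not event_date: continue` (missing)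
        | some event_date =>
          if event_date = "" then acc  -- `if not event_date: continue` (empty string)
          else
            let acc1 := if acc.contains event_date then acc else acc.insert event_date []
            acc1.modify event_date [] (fun l => l ++ [pvProj ev])
  ) PySem.Dict.empty).items

-- ===== PORT B =====
-- date of an event dict; inside `pvDated` the key is present and non-empty, so getD "" is exact for e["date"]
def pvEvDate (ev : List (String × String)) : String := (PySem.Dict.ofList ev).getD "date" ""

-- `[event for event in events if event and event.get("date")]`
def pvDated (events : List (Option (List (String × String)))) : List (List (String × String)) :=
  events.filterMap (fun event =>
    match event with
    | none => none
    | some ev => if ev ≠ [] ∧ pvEvDate ev ≠ "" then some ev else none)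

def group_events_by_date_py_alt (events : List (Option (List (String × String)))) : List (String × List (List (String × String))) :=
  let dated := pvDated events
  let dates := PySem.List.dedup (dated.map pvEvDate)   -- list(dict.fromkeys(...))
  dates.map (fun date => (date, (dated.filter (fun ev => pvEvDate ev == date)).map pvProj))

-- ===== PRECONDITION & SPEC =====
-- Pre_ requires every grouped (non-skipped) event to carry an "id" key: when it is absent, BOTH
-- Pythons return {"id": None, ...}, and that None value is not representable in the required Lean
-- output type (inner dicts are String-valued), so those inputs cannot be ported; A and B agree there.
def Pre_group_events_by_date_py (events : List (Option (List (String × String)))) : Prop :=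
  (events.all (fun event =>
    match event with
    | none => true
    | some ev =>
      if ev = [] then true
      else if pvEvDate ev = "" then true
      else (PySem.Dict.ofList ev).contains "id")) = true
instance (events : List (Option (List (String × String)))) : Decidable (Pre_group_events_by_date_py events) := by unfold Pre_group_events_by_date_py; infer_instance
def pvWitness_group_events_by_date_py : (List (Option (List (String × String)))) :=
  [some [("date", "2024-01-01"), ("id", "7"), ("title", "t")], none, some [("x", "y")]]
def Spec_group_events_by_date_py (events : List (Option (List (String × String)))) (out : List (String × List (List (String × String)))) : Prop := out = group_events_by_date_py_alt events
instance (events : List (Option (List (String × String)))) (out : List (String × List (List (String × String)))) : Decidable (Spec_group_events_by_date_py events out) := by unfold Spec_group_events_by_date_py; infer_instance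

-- ===== CLAIM (what is proved, stated in full; the proofs are below) =====
def Claim_equal_group_events_by_date_py : Prop := ∀ (events : List (Option (List (String × String)))), Dom_group_events_by_date_py events → Pre_group_events_by_date_py events → Spec_group_events_by_date_py events (group_events_by_date_py events)

-- ===== LEMMAS AND PROOFS =====

-- the grouping step A performs on each kept event, after the setdefault is folded in
def pvStep (acc : PySem.Dict String (List (List (String × String)))) (ev : List (String × String)) : PySem.Dict String (List (List (String × String))) :=
  acc.modify (pvEvDate ev) [] (fun l => l ++ [pvProj ev])

-- setdefault-then-append equals a single modify
theorem pvStep_eq (acc : PySem.Dict String (List (List (String × String)))) (k : String)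
    (f : List (List (String × String)) → List (List (String × String))) :
    (if acc.contains k then acc else acc.insert k []).modify k [] f = acc.modify k [] f := by
  by_cases h : acc.contains k = true
  · simp [h]
  · have h' : acc.contains k = false := by simpa using h
    simp only [h', Bool.false_eq_true, if_false]
    simp [PySem.Dict.modify, PySem.Dict.getD_insert_self, PySem.Dict.insert_insert_self,
      PySem.Dict.getD_of_not_contains _ _ h']

-- A's fold over all events equals the fold of pvStep over the kept (dated) events
theorem pvFold_skip (events : List (Option (List (String × String))))
    (acc : PySem.Dict String (List (List (String × String)))) :
    events.foldl (fun acc event =>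
      match event with
      | none => acc
      | some ev =>
        if ev = [] then acc
        else
          match (PySem.Dict.ofList ev).get? "date" with
          | none => acc
          | some event_date =>
            if event_date = "" then acc
            else
              let acc1 := if acc.contains event_date then acc else acc.insert event_date []
              acc1.modify event_date [] (fun l => l ++ [pvProj ev])) acc
    = (pvDated events).foldl pvStep acc := by
  induction events generalizing acc with
  | nil => rfl
  | cons e es ih =>
    cases e with
    | none => simpa [pvDated] using ih acc
    | some ev =>
      by_cases he : ev = []
      · simp only [List.foldl_cons, he]
        simpa [pvDated, he] using ih acc
      · cases hd : (PySem.Dict.ofList ev).get? "date" with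
        | none =>
          have hdate : pvEvDate ev = "" := by simp [pvEvDate, PySem.Dict.getD_eq_get?_getD, hd]
          simp only [List.foldl_cons, hd, if_neg he]
          simpa [pvDated, he, hdate] using ih acc
        | some s =>
          have hdate : pvEvDate ev = s := by simp [pvEvDate, PySem.Dict.getD_eq_get?_getD, hd]
          by_cases hs : s = ""
          · simp only [List.foldl_cons, hd, if_neg he, hs]
            simpa [pvDated, he, hdate, hs] using ih acc
          · simp only [List.foldl_cons, hd, if_neg he, if_neg hs]
            rw [pvStep_eq]
            have : pvDated (some ev :: es) = ev :: pvDated es := by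
              simp [pvDated, he, hdate, hs]
            rw [this, List.foldl_cons]
            have hstep : (acc.modify s [] (fun l => l ++ [pvProj ev])) = pvStep acc ev := by
              simp [pvStep, hdate]
            rw [hstep, ih]

theorem pvFold_items (dated : List (List (String × String))) :
    (dated.foldl pvStep PySem.Dict.empty).items
    = (PySem.List.dedup (dated.map pvEvDate)).map
        (fun k => (k, (dated.filter (fun ev => pvEvDate ev == k)).map pvProj)) := by
  have hfold : dated.foldl pvStep PySem.Dict.empty
      = (dated.map (fun ev => (pvEvDate ev, pvProj ev))).foldl
          (fun d p => d.modify p.1 [] (fun l => l ++ [p.2])) PySem.Dict.empty := by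
    rw [List.foldl_map]; rfl
  have hkeys : (dated.foldl pvStep PySem.Dict.empty).keys = PySem.List.dedup (dated.map pvEvDate) := by
    rw [hfold, PySem.Dict.keys_foldl_modify_key]
    simp [PySem.Set.update_nil_left, List.map_map, Function.comp_def]
  have hnodup : (dated.foldl pvStep PySem.Dict.empty).keys.Nodup := by
    rw [hkeys]; exact PySem.List.nodup_dedup _
  have hgetD : ∀ k, (dated.foldl pvStep PySem.Dict.empty).getD k [] = (dated.filter (fun ev => pvEvDate ev == k)).map pvProj := by
    intro k
    rw [hfold, PySem.Dict.getD_foldl_modify_append]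
    rw [List.filter_map]
    simp [List.map_map, Function.comp_def]
  rw [PySem.Dict.items_eq_map_keys _ hnodup [], hkeys]
  exact List.map_congr_left (fun k _ => by rw [hgetD k])

-- ===== VERDICT (by name: the statement is the Claim_ definition above) =====
theorem group_events_by_date_py_spec : Claim_equal_group_events_by_date_py := by
  intro events _ _
  show group_events_by_date_py events = group_events_by_date_py_alt events
  unfold group_events_by_date_py group_events_by_date_py_alt
  rw [pvFold_skip, pvFold_items]
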